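-- pv_equiv track=rewrite | github.com/JoshuaFantillo/comparing-different-machine-learning-models-to-predict-group-performance | get_attributes.py | unclear_words
-- ===== SOURCE A (Python) =====
-- def unclear_words(token_sentence):
-- 	unclear = 0
-- 	check = False
-- 	for item in token_sentence:
-- 		for word in item:
-- 			if check == True:
-- 				if word == 'unclear':
-- 					unclear += 1
-- 				check = False
-- 			if word == '[':
-- 				check = True
-- 	return unclear
-- ===== SOURCE B (Python) =====
-- def unclear_words(token_sentence):
--     flat = [w for item in token_sentence for w in item]
--     segs = []
--     cur = []
--     for w in flat:
--         if w == '[':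
--             segs.append(cur)
--             cur = []
--         else:
--             cur.append(w)
--     segs.append(cur)
--     return len([seg for seg in segs[1:] if seg[:1] == ['unclear']])
-- ===== Notes on version B (the rewrite author's own statement) =====
-- stated objective: alternative
-- what changed: Instead of threading a boolean 'just saw [' flag through nested loops, B splits the flattened word list into segments at '[' delimiters and counts the segments (after the first) whose first word is 'unclear'.
import Mathlib
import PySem

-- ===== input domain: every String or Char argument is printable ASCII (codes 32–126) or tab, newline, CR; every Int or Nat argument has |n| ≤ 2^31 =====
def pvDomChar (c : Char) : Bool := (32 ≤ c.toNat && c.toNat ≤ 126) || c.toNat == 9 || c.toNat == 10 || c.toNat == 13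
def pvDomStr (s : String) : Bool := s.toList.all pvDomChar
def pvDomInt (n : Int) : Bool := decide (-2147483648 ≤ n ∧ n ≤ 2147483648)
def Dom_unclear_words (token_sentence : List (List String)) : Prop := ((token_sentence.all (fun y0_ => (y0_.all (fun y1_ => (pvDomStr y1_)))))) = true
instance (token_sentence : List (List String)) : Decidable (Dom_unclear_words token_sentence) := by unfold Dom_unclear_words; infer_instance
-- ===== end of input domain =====

-- B replaces A's 'just saw [' flag threaded through nested loops by splitting the flattened
-- word list into segments at '[' delimiters and counting segments whose first word is 'unclear'
-- (alternative decomposition, same cost).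

-- ===== PORT A =====
-- one word step of A's inner loop on the state (unclear, check)
def unclearStep (s : Int × Bool) (word : String) : Int × Bool :=
  let u := if s.2 then (if word = "unclear" then s.1 + 1 else s.1) else s.1
  (u, word = "[")

def unclear_words (token_sentence : List (List String)) : Int :=
  (token_sentence.foldl (fun s item => item.foldl unclearStep s) (0, false)).1

-- ===== PORT B =====
-- one word step of Source B's splitter loop on the state (segs, cur)
def splitStep (s : List (List String) × List String) (w : String) : List (List String) × List String :=
  if w = "[" then (s.1 ++ [s.2], []) else (s.1, s.2 ++ [w])

def unclear_words_alt (token_sentence : List (List String)) : Int :=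
  let flat := token_sentence.flatMap (fun item => item)
  let s := flat.foldl splitStep ([], [])
  let segs := s.1 ++ [s.2]
  (((segs.drop 1).filter (fun seg => seg.take 1 = ["unclear"])).length : Int)

-- ===== PRECONDITION & SPEC =====
def Spec_unclear_words (token_sentence : List (List String)) (out : Int) : Prop := out = unclear_words_alt token_sentence
instance (token_sentence : List (List String)) (out : Int) : Decidable (Spec_unclear_words token_sentence out) := by unfold Spec_unclear_words; infer_instance

-- ===== CLAIM (what is proved, stated in full; the proofs are below) =====
def Claim_equal_unclear_words : Prop := ∀ (token_sentence : List (List String)), Dom_unclear_words token_sentence → Spec_unclear_words token_sentence (unclear_words token_sentence)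

-- ===== LEMMAS AND PROOFS =====

-- the contribution the current (still open) segment will make once appended
def segBonus (segs : List (List String)) (cur : List String) : Int :=
  if segs = [] then 0 else if cur.take 1 = ["unclear"] then 1 else 0

-- abstraction of B's splitter state: count of closed counted segments plus the open segment's bonus
def psi (segs : List (List String)) (cur : List String) : Int :=
  (((segs.drop 1).filter (fun seg => seg.take 1 = ["unclear"])).length : Int) + segBonus segs cur

theorem psi_append (segs : List (List String)) (cur : List String) :
    ((((segs ++ [cur]).drop 1).filter (fun seg => seg.take 1 = ["unclear"])).length : Int)
      = psi segs cur := by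
  cases segs with
  | nil => simp [psi, segBonus]
  | cons a t =>
      simp only [psi, segBonus, List.cons_append, List.drop_succ_cons, List.drop_zero,
        List.filter_append, List.length_append, List.filter_cons, List.filter_nil]
      by_cases h : cur.take 1 = ["unclear"] <;> simp [h]

-- A's flag-fold advances exactly by the change of psi along B's splitter fold
theorem inv (l : List String) : ∀ (segs : List (List String)) (cur : List String) (u : Int) (c : Bool),
    (c = true ↔ (cur = [] ∧ segs ≠ [])) →
    (l.foldl unclearStep (u, c)).1
      = u + (psi (l.foldl splitStep (segs, cur) ).1 (l.foldl splitStep (segs, cur)).2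
             - psi segs cur) := by
  induction l with
  | nil => intro segs cur u c _; simp
  | cons w rest ih =>
      intro segs cur u c hc
      simp only [List.foldl_cons, unclearStep, splitStep]
      by_cases hw : w = "["
      · -- a delimiter: cur is closed, flag becomes true
        subst hw
        have hpsi : psi (segs ++ [cur]) [] = psi segs cur := by
          rw [psi.eq_def, psi_append]; simp [segBonus]
        have h := ih (segs ++ [cur]) [] u true (by simp)
        have hne : ¬(("[" : String) = "unclear") := by decide
        simp only [if_neg hne, ite_self, decide_true, if_true]
        rw [h, hpsi]
      · -- an ordinary word: it joins the open segment
        have h := ih segs (cur ++ [w]) (if c then (if w = "unclear" then u + 1 else u) else u) false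
          (by simp)
        have hdiff : psi segs (cur ++ [w])
            = psi segs cur + (if c = true ∧ w = "unclear" then (1 : Int) else 0) := by
          cases c with
          | true =>
              obtain ⟨hcur, hs⟩ := hc.mp rfl
              subst hcur
              simp only [psi, segBonus, List.nil_append]
              by_cases hu : w = "unclear" <;> simp [hs, hu]
          | false =>
              have hnc : ¬ (cur = [] ∧ segs ≠ []) := fun hh => by simpa using hc.mpr hh
              simp only [psi, segBonus]
              by_cases hs : segs = []
              · simp [hs]
              · have hcur : cur ≠ [] := fun hnil => hnc ⟨hnil, hs⟩
                obtain ⟨x, xs, rfl⟩ := List.exists_cons_of_ne_nil hcur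
                simp [hs]
        simp only [if_neg hw]
        rw [show (decide (w = "[")) = false from by simp [hw]]
        rw [h, hdiff]
        cases c <;> by_cases hu : w = "unclear" <;> simp [hu] <;> try ring

-- A's nested fold equals the flat fold over the flattened list
theorem nested_foldl_eq_flat (ts : List (List String)) (s : Int × Bool) :
    ts.foldl (fun s item => item.foldl unclearStep s) s
      = (ts.flatMap (fun item => item)).foldl unclearStep s := by
  induction ts generalizing s with
  | nil => simp
  | cons item rest ih => simp [List.flatMap_cons, List.foldl_append, ih]

-- ===== VERDICT (by name: the statement is the Claim_ definition above) =====
theorem unclear_words_spec : Claim_equal_unclear_words := by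
  intro ts _
  unfold Spec_unclear_words unclear_words unclear_words_alt
  rw [nested_foldl_eq_flat]
  rw [inv (ts.flatMap (fun item => item)) [] [] 0 false (by simp)]
  rw [psi_append]
  simp [psi, segBonus]
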